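-- pv_equiv track=rewrite | github.com/madargani/GFG-POTD | 2023/06/04 Reversing the Equation/code.py/code.py | reverseEqn
-- ===== SOURCE A (Python) =====
-- def reverseEqn(s):
--     tokens = []
--     i = 0
--     while i < len(s):
--         token = s[i]
--         if not s[i].isdigit():
--             tokens.append(token)
--             i += 1
--             continue
--
--         i += 1
--         while i < len(s) and s[i].isdigit():
--             token += s[i]
--             i += 1
--         tokens.append(token)
--
--     tokens.reverse()
--     return "".join(tokens)
-- ===== SOURCE B (Python) =====
-- def reverseEqn(s):
--     # One pass with an accumulator: non-digit chars flush the pending digit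
--     # run and are prepended, so the output is built back-to-front.
--     out = ""
--     cur = ""
--     for c in s:
--         if c.isdigit():
--             cur += c
--         else:
--             out = c + cur + out
--             cur = ""
--     return cur + out
-- ===== Notes on version B (the rewrite author's own statement) =====
-- stated objective: simpler
-- what changed: A tokenizes into a list with an inner digit-gathering loop, reverses the token list and joins; B is a single fold with two accumulators that prepends each non-digit char plus the pending digit run, building the output back-to-front with no token list.
import Mathlib
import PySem

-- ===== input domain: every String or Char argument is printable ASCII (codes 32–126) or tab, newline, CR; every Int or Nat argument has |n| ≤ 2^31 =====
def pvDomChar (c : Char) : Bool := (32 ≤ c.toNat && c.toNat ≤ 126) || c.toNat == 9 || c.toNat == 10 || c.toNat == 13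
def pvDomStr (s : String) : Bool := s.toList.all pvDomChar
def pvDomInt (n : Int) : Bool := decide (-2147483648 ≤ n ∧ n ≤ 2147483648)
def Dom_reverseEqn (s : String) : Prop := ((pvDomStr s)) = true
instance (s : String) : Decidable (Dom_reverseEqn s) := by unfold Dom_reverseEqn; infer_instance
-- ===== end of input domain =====

-- B replaces A's tokenize/reverse/join with a single left fold over the characters that
-- builds the output back-to-front via two accumulators (objective: simpler; not faster).

-- ===== PORT A =====
-- outer while loop of A, collecting tokens; the inner digit-gathering while is takeWhile/dropWhile
def reverseEqnTokens : List Char → List (List Char)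
  | [] => []
  | c :: t =>
    if ¬ PySem.Chars.isdigit c then [c] :: reverseEqnTokens t
    else (c :: t.takeWhile PySem.Chars.isdigit) ::
         reverseEqnTokens (t.dropWhile PySem.Chars.isdigit)
  termination_by l => l.length
  decreasing_by
    all_goals (have := t.length_dropWhile_le (p := PySem.Chars.isdigit); simp; try omega)

def reverseEqn (s : String) : String :=
  String.ofList ((reverseEqnTokens s.toList).reverse.flatten)

-- ===== PORT B =====
-- B's loop body: digit chars extend the pending run `cur`; any other char is prepended
-- together with `cur` to the output built back-to-front
def reverseEqnStep (st : List Char × List Char) (c : Char) : List Char × List Char :=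
  if PySem.Chars.isdigit c then (st.1 ++ [c], st.2)
  else ([], c :: st.1 ++ st.2)

def reverseEqn_alt (s : String) : String :=
  let p := s.toList.foldl reverseEqnStep ([], [])
  String.ofList (p.1 ++ p.2)

-- ===== PRECONDITION & SPEC =====
def Spec_reverseEqn (s : String) (out : String) : Prop := out = reverseEqn_alt s
instance (s : String) (out : String) : Decidable (Spec_reverseEqn s out) := by unfold Spec_reverseEqn; infer_instance

-- ===== CLAIM (what is proved, stated in full; the proofs are below) =====
def Claim_equal_reverseEqn : Prop := ∀ (s : String), Dom_reverseEqn s → Spec_reverseEqn s (reverseEqn s)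

-- ===== LEMMAS AND PROOFS =====

-- folding B's step over an all-digit block just appends it to the pending run
theorem fold_step_digits : ∀ (w : List Char), (∀ d ∈ w, PySem.Chars.isdigit d = true) →
    ∀ cur out : List Char, w.foldl reverseEqnStep (cur, out) = (cur ++ w, out) := by
  intro w
  induction w with
  | nil => intro _ cur out; simp
  | cons d w' ih =>
    intro h cur out
    have hd : PySem.Chars.isdigit d = true := h d List.mem_cons_self
    rw [List.foldl_cons]
    simp only [reverseEqnStep, hd, if_pos]
    rw [ih (fun x hx => h x (List.mem_cons_of_mem _ hx))]
    simp

-- invariant: folding B's step from ([], out) over l yields A's reversed-token flatten, prepended to out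
theorem fold_step_eq_tokens : ∀ l : List Char, ∀ out : List Char,
    (l.foldl reverseEqnStep ([], out)).1 ++ (l.foldl reverseEqnStep ([], out)).2 =
      ((reverseEqnTokens l).reverse).flatten ++ out := by
  intro l
  induction l using reverseEqnTokens.induct with
  | case1 => intro out; simp [reverseEqnTokens]
  | case2 c t hc ih =>
    intro out
    have hcf : PySem.Chars.isdigit c = false := by simpa using hc
    rw [List.foldl_cons]
    simp only [reverseEqnStep, hcf, Bool.false_eq_true, if_false]
    rw [reverseEqnTokens, if_pos hc]
    simp only [List.nil_append, List.cons_append]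
    rw [ih (c :: out)]
    simp
  | case3 c t hc ih =>
    intro out
    have hcd : PySem.Chars.isdigit c = true := by simpa using hc
    set w := t.takeWhile PySem.Chars.isdigit with hw
    set r := t.dropWhile PySem.Chars.isdigit with hr
    have hsplit : t = w ++ r := (List.takeWhile_append_dropWhile).symm
    have hdigw : ∀ d ∈ w, PySem.Chars.isdigit d = true := fun d hd => List.mem_takeWhile_imp hd
    rw [List.foldl_cons]
    simp only [reverseEqnStep, hcd, if_pos]
    conv_lhs => rw [hsplit]
    rw [List.foldl_append, fold_step_digits w hdigw]
    simp only [List.nil_append]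
    rw [reverseEqnTokens, if_neg hc]
    simp only [List.reverse_cons, List.flatten_append, List.flatten_cons, List.flatten_nil,
      List.append_nil]
    -- case on r: empty, or it starts with a non-digit char
    simp only [← hr, ← hw]
    rcases hR : r with _ | ⟨d, r'⟩
    · simp [reverseEqnTokens]
    · have hdf : PySem.Chars.isdigit d = false := by
        have hne : t.dropWhile PySem.Chars.isdigit ≠ [] := by rw [← hr, hR]; simp
        have := List.head_dropWhile_not PySem.Chars.isdigit (l := t) hne
        simpa [← hr, hR] using this
      have key := ih ((c :: w) ++ out)
      rw [hR, List.foldl_cons] at key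
      simp only [reverseEqnStep, hdf, Bool.false_eq_true, if_false, List.nil_append] at key
      rw [List.foldl_cons]
      simp only [reverseEqnStep, hdf, Bool.false_eq_true, if_false]
      -- align the starting states and finish with associativity
      simp only [List.cons_append, List.nil_append, List.append_assoc] at key ⊢
      rw [key]

-- ===== VERDICT (by name: the statement is the Claim_ definition above) =====
theorem reverseEqn_spec : Claim_equal_reverseEqn := by
  intro s _
  unfold Spec_reverseEqn reverseEqn reverseEqn_alt
  have := fold_step_eq_tokens s.toList []
  simp only [List.append_nil] at this
  simp [this]
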